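-- pv_equiv track=rewrite | github.com/Su-informatics-lab/DelPHEA-irAKI | prompts/formatter.py | safe_schema_format
-- ===== SOURCE A (Python) =====
-- from typing import Dict, Iterable
--
-- def safe_schema_format(template: str, mapping: Dict[str, str]) -> str:
--     """escape json braces except placeholders, then format."""
--     protected = (("{qids_scores}", "«QS»"), ("{qids_evidence}", "«QE»"))
--     tmp = template
--     for needle, token in protected:
--         tmp = tmp.replace(needle, token)
--
--     tmp = tmp.replace("{", "{{").replace("}", "}}")
--
--     for needle, token in protected:
--         tmp = tmp.replace(token, needle)
--
--     return tmp.format(**mapping)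
-- ===== SOURCE B (Python) =====
-- import re
--
-- def safe_schema_format(template: str, mapping) -> str:
--     """single-pass substitution of exactly the two placeholders; no escaping/format needed."""
--     return re.sub(r"\{(qids_scores|qids_evidence)\}",
--                   lambda m: mapping[m.group(1)], template)
-- ===== Notes on version B (the rewrite author's own statement) =====
-- stated objective: idiomatic
-- what changed: B drops A's protect/escape/restore/format round-trip (six replace passes plus str.format) and substitutes the two placeholders directly in one left-to-right re.sub pass with a callable replacement, which inserts mapping values literally and never re-expands them.
import Mathlib
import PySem

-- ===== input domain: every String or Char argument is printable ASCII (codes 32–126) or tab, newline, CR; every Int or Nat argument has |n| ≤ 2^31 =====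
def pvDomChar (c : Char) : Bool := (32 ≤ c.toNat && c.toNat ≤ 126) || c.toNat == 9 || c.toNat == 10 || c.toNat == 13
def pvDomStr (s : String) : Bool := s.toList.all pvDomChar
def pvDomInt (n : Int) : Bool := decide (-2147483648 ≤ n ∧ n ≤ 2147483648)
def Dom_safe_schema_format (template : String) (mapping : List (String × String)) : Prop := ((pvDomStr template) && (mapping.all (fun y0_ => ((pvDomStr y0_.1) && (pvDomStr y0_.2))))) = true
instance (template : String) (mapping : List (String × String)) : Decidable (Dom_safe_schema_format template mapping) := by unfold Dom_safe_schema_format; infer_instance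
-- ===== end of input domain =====

-- B replaces A's protect/escape/format round-trip by one left-to-right scan substituting the
-- two placeholders directly (idiomatic; same cost).

-- first-match lookup in the association list = Python dict lookup; "" where Python's
-- KeyError would fire (such inputs are excluded by Pre_safe_schema_format)
def pvLookupD (m : List (String × String)) (k : String) : List Char :=
  ((List.lookup k m).getD "").toList

-- ===== PORT A =====
-- hand port of str.format(**mapping) on a brace-escaped template: '{{'→'{', '}}'→'}',
-- '{name}'→mapping[name]; exact on every string A's format call ever receives (all braces
-- doubled except the two literal placeholders); Python's ValueError branch (lone '}') is
-- unreachable there and returns [] here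
def pvFmt (m : List (String × String)) : List Char → List Char
  | [] => []
  | c :: rest =>
    if c = '{' then
      if rest.head? = some '{' then '{' :: pvFmt m rest.tail
      else
        pvLookupD m (String.ofList (rest.takeWhile (fun d => d ≠ '}')))
          ++ pvFmt m (rest.drop ((rest.takeWhile (fun d => d ≠ '}')).length + 1))
    else if c = '}' then
      if rest.head? = some '}' then '}' :: pvFmt m rest.tail
      else []
    else c :: pvFmt m rest
termination_by l => l.length
decreasing_by all_goals (simp; try omega)

def safe_schema_format (template : String) (mapping : List (String × String)) : String :=
  let tmp1 := PySem.Str.replace template "{qids_scores}" "«QS»"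
  let tmp2 := PySem.Str.replace tmp1 "{qids_evidence}" "«QE»"
  let tmp3 := PySem.Str.replace tmp2 "{" "{{"
  let tmp4 := PySem.Str.replace tmp3 "}" "}}"
  let tmp5 := PySem.Str.replace tmp4 "«QS»" "{qids_scores}"
  let tmp6 := PySem.Str.replace tmp5 "«QE»" "{qids_evidence}"
  String.ofList (pvFmt mapping tmp6.toList)

-- ===== PORT B =====
-- port of Source B's re.sub with the alternation \{(qids_scores|qids_evidence)\}: a single
-- left-to-right scan trying the two literal alternatives at each position (exact, since the
-- pattern is an alternation of two literals); mapping[...] is pvLookupD ("" outside Pre_)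
def pvScan (m : List (String × String)) : List Char → List Char
  | [] => []
  | c :: rest =>
    if "{qids_scores}".toList.isPrefixOf (c :: rest) then
      pvLookupD m "qids_scores" ++ pvScan m ((c :: rest).drop 13)
    else if "{qids_evidence}".toList.isPrefixOf (c :: rest) then
      pvLookupD m "qids_evidence" ++ pvScan m ((c :: rest).drop 15)
    else c :: pvScan m rest
termination_by l => l.length
decreasing_by all_goals (simp; try omega)

def safe_schema_format_alt (template : String) (mapping : List (String × String)) : String :=
  String.ofList (pvScan mapping template.toList)

-- ===== PRECONDITION & SPEC =====
-- Pre_ excludes exactly the inputs where Python A raises KeyError: a placeholder occurs in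
-- the template but its key is missing from mapping (B raises the same KeyError there).
def Pre_safe_schema_format (template : String) (mapping : List (String × String)) : Prop :=
  (PySem.Str.isIn "{qids_scores}" template = true → (List.lookup "qids_scores" mapping).isSome = true) ∧
  (PySem.Str.isIn "{qids_evidence}" template = true → (List.lookup "qids_evidence" mapping).isSome = true)
instance (template : String) (mapping : List (String × String)) : Decidable (Pre_safe_schema_format template mapping) := by unfold Pre_safe_schema_format; infer_instance

def pvWitness_safe_schema_format : String × (List (String × String)) :=
  ("irAKI: {qids_scores}; {qids_evidence} {other}", [("qids_scores", "[1, 2]"), ("qids_evidence", "ev")])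

def Spec_safe_schema_format (template : String) (mapping : List (String × String)) (out : String) : Prop := out = safe_schema_format_alt template mapping
instance (template : String) (mapping : List (String × String)) (out : String) : Decidable (Spec_safe_schema_format template mapping out) := by unfold Spec_safe_schema_format; infer_instance

-- ===== CLAIM (what is proved, stated in full; the proofs are below) =====
def Claim_equal_safe_schema_format : Prop := ∀ (template : String) (mapping : List (String × String)), Dom_safe_schema_format template mapping → Pre_safe_schema_format template mapping → Spec_safe_schema_format template mapping (safe_schema_format template mapping)

-- ===== LEMMAS AND PROOFS =====

-- recursion-friendly characterisation of PySem.Chars.replace for a nonempty needle a :: o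
def pvRep (a : Char) (old' new : List Char) : List Char → List Char
  | [] => []
  | c :: t =>
    if (a :: old').isPrefixOf (c :: t) then new ++ pvRep a old' new (t.drop old'.length)
    else c :: pvRep a old' new t
termination_by l => l.length
decreasing_by all_goals (simp; try omega)

lemma pvRep_go_eq (a : Char) (o n : List Char) : ∀ (fuel : Nat) (s acc : List Char), s.length ≤ fuel →
    PySem.Chars.replace.go (a :: o) n fuel s acc = acc.reverse ++ pvRep a o n s := by
  intro fuel
  induction fuel with
  | zero =>
    intro s acc h
    have : s = [] := List.length_eq_zero_iff.mp (Nat.le_zero.mp h)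
    subst this
    simp [PySem.Chars.replace.go, pvRep]
  | succ f ih =>
    intro s acc h
    cases s with
    | nil => simp [PySem.Chars.replace.go, pvRep]
    | cons c t =>
      rw [PySem.Chars.replace.go]
      by_cases hp : (a :: o).isPrefixOf (c :: t) = true
      · rw [if_pos hp, ih _ _ (by simp at h ⊢; omega)]
        rw [pvRep, if_pos hp]
        simp
      · rw [if_neg hp, ih _ _ (by simp at h ⊢; omega)]
        rw [pvRep, if_neg hp]
        simp

lemma replace_eq_pvRep (a : Char) (o n s : List Char) :
    PySem.Chars.replace s (a :: o) n = pvRep a o n s := by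
  rw [PySem.Chars.replace]
  simp [pvRep_go_eq a o n s.length s [] le_rfl]

lemma pvRep_pos {a : Char} {o : List Char} {l : List Char} (n : List Char)
    (h : (a :: o).isPrefixOf l = true) :
    pvRep a o n l = n ++ pvRep a o n (l.drop (o.length + 1)) := by
  cases l with
  | nil => simp at h
  | cons c t => rw [pvRep, if_pos h]; simp

lemma pvRep_neg {a : Char} {o : List Char} {c : Char} {t : List Char} (n : List Char)
    (h : (a :: o).isPrefixOf (c :: t) = false) :
    pvRep a o n (c :: t) = c :: pvRep a o n t := by
  rw [pvRep, if_neg (by simp [h])]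

lemma isPrefixOf_cons_ne {a c : Char} (o t : List Char) (h : a ≠ c) :
    (a :: o).isPrefixOf (c :: t) = false := by
  simp [List.isPrefixOf_cons₂, h]

lemma pvRep_skip {a : Char} {o n : List Char} (pre z : List Char) (h : ∀ c ∈ pre, c ≠ a) :
    pvRep a o n (pre ++ z) = pre ++ pvRep a o n z := by
  induction pre with
  | nil => simp
  | cons p pr ih =>
    have hp : a ≠ p := fun e => (h p (by simp)) e.symm
    rw [List.cons_append, pvRep_neg _ (isPrefixOf_cons_ne _ _ hp),
        ih (fun c hc => h c (by simp [hc]))]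
    simp

-- a prefix of the output of pvRep that avoids the replacement's head character was copied
-- literally, hence is a prefix of the input
lemma pvRep_reflect {a : Char} {o : List Char} {b : Char} {n' : List Char} :
    ∀ (N : Nat) (l p : List Char), l.length ≤ N → p <+: pvRep a o (b :: n') l →
      (∀ c ∈ p, c ≠ b) → p <+: l := by
  intro N
  induction N with
  | zero =>
    intro l p hN hpfx _
    have : l = [] := List.length_eq_zero_iff.mp (Nat.le_zero.mp hN)
    subst this
    simpa [pvRep] using hpfx
  | succ N ih =>
    intro l p hN hpfx hb
    cases l with
    | nil => simpa [pvRep] using hpfx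
    | cons c t =>
      by_cases hp : (a :: o).isPrefixOf (c :: t) = true
      · rw [pvRep_pos _ hp] at hpfx
        cases p with
        | nil => simp
        | cons q p' =>
          exfalso
          have : q = b := (List.cons_prefix_cons.mp hpfx).1
          exact hb q (by simp) this
      · rw [pvRep_neg _ (Bool.eq_false_iff.mpr hp)] at hpfx
        cases p with
        | nil => simp
        | cons q p' =>
          obtain ⟨rfl, hpfx'⟩ := List.cons_prefix_cons.mp hpfx
          exact List.cons_prefix_cons.mpr ⟨rfl,
            ih t p' (by simp at hN; omega) hpfx' (fun c hc => hb c (by simp [hc]))⟩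

-- prefix-peeling corollaries used to push each replace stage one step
lemma pvRep_pref (a : Char) (o n z : List Char) :
    pvRep a o n ((a :: o) ++ z) = n ++ pvRep a o n z := by
  rw [pvRep_pos n (List.isPrefixOf_iff_prefix.mpr ⟨z, rfl⟩)]
  congr 1
  rw [show ((a :: o) ++ z : List Char).drop (o.length + 1)
        = ((a :: o) ++ z : List Char).drop (a :: o).length from rfl, List.drop_left]

lemma pvRep_pref' (a : Char) (o n z : List Char) :
    pvRep a o n (a :: (o ++ z)) = n ++ pvRep a o n z := pvRep_pref a o n z

lemma pvRep_single_pos (a : Char) (n z : List Char) :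
    pvRep a [] n (a :: z) = n ++ pvRep a [] n z := by
  rw [pvRep_pos n (by simp [List.isPrefixOf])]
  congr 1

lemma pvRep_neg_app {a : Char} {o : List Char} (n : List Char) {c : Char} {pre z : List Char}
    (h : (a :: o).isPrefixOf ((c :: pre) ++ z) = false) :
    pvRep a o n ((c :: pre) ++ z) = c :: pvRep a o n (pre ++ z) := pvRep_neg n h

lemma pvRep_step {a : Char} {o : List Char} (n : List Char) {c : Char} {t : List Char}
    (h : a ≠ c) : pvRep a o n (c :: t) = c :: pvRep a o n t :=
  pvRep_neg n (isPrefixOf_cons_ne _ _ h)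

-- pvFmt peeling lemmas
lemma pvFmt_scores (m : List (String × String)) (u : List Char) :
    pvFmt m (['{','q','i','d','s','_','s','c','o','r','e','s','}'] ++ u)
      = pvLookupD m "qids_scores" ++ pvFmt m u := by
  show pvFmt m ('{' :: (['q','i','d','s','_','s','c','o','r','e','s','}'] ++ u)) = _
  rw [pvFmt]
  simp

lemma pvFmt_evidence (m : List (String × String)) (u : List Char) :
    pvFmt m (['{','q','i','d','s','_','e','v','i','d','e','n','c','e','}'] ++ u)
      = pvLookupD m "qids_evidence" ++ pvFmt m u := by
  show pvFmt m ('{' :: (['q','i','d','s','_','e','v','i','d','e','n','c','e','}'] ++ u)) = _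
  rw [pvFmt]
  simp

lemma pvFmt_lbrace (m : List (String × String)) (u : List Char) :
    pvFmt m ('{' :: '{' :: u) = '{' :: pvFmt m u := by
  rw [pvFmt]; simp

lemma pvFmt_rbrace (m : List (String × String)) (u : List Char) :
    pvFmt m ('}' :: '}' :: u) = '}' :: pvFmt m u := by
  rw [pvFmt]; simp

lemma pvFmt_other (m : List (String × String)) {c : Char} (u : List Char)
    (h1 : c ≠ '{') (h2 : c ≠ '}') :
    pvFmt m (c :: u) = c :: pvFmt m u := by
  rw [pvFmt]; simp [h1, h2]

-- pvScan peeling lemmas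
lemma pvScan_scores (m : List (String × String)) {s : List Char}
    (h : (['{','q','i','d','s','_','s','c','o','r','e','s','}'] : List Char).isPrefixOf s = true) :
    pvScan m s = pvLookupD m "qids_scores" ++ pvScan m (s.drop 13) := by
  cases s with
  | nil => simp [List.isPrefixOf] at h
  | cons c t =>
    rw [pvScan]
    simp only [show ("{qids_scores}" : String).toList = ['{','q','i','d','s','_','s','c','o','r','e','s','}'] from rfl,
               show ("{qids_evidence}" : String).toList = ['{','q','i','d','s','_','e','v','i','d','e','n','c','e','}'] from rfl]
    rw [if_pos h]

lemma pvScan_evidence (m : List (String × String)) {s : List Char}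
    (h1 : (['{','q','i','d','s','_','s','c','o','r','e','s','}'] : List Char).isPrefixOf s = false)
    (h2 : (['{','q','i','d','s','_','e','v','i','d','e','n','c','e','}'] : List Char).isPrefixOf s = true) :
    pvScan m s = pvLookupD m "qids_evidence" ++ pvScan m (s.drop 15) := by
  cases s with
  | nil => simp [List.isPrefixOf] at h2
  | cons c t =>
    rw [pvScan]
    simp only [show ("{qids_scores}" : String).toList = ['{','q','i','d','s','_','s','c','o','r','e','s','}'] from rfl,
               show ("{qids_evidence}" : String).toList = ['{','q','i','d','s','_','e','v','i','d','e','n','c','e','}'] from rfl]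
    rw [if_neg (Bool.eq_false_iff.mp h1), if_pos h2]

lemma pvScan_step (m : List (String × String)) {c : Char} {t : List Char}
    (h1 : (['{','q','i','d','s','_','s','c','o','r','e','s','}'] : List Char).isPrefixOf (c :: t) = false)
    (h2 : (['{','q','i','d','s','_','e','v','i','d','e','n','c','e','}'] : List Char).isPrefixOf (c :: t) = false) :
    pvScan m (c :: t) = c :: pvScan m t := by
  rw [pvScan]
  simp only [show ("{qids_scores}" : String).toList = ['{','q','i','d','s','_','s','c','o','r','e','s','}'] from rfl,
             show ("{qids_evidence}" : String).toList = ['{','q','i','d','s','_','e','v','i','d','e','n','c','e','}'] from rfl]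
  rw [if_neg (Bool.eq_false_iff.mp h1), if_neg (Bool.eq_false_iff.mp h2)]

lemma pvNoPre_T1_T2 (z : List Char) :
    (['«','Q','S','»'] : List Char).isPrefixOf (('«' :: ['Q','E','»']) ++ z) = false := by
  simp [List.isPrefixOf_cons₂]

-- the heart of the proof: A's protect/escape/restore/format pipeline, stage by stage,
-- computes exactly B's single scan
lemma pvCore (m : List (String × String)) : ∀ (N : Nat) (s : List Char), s.length ≤ N →
    (∀ c ∈ s, pvDomChar c = true) →
    pvFmt m (pvRep '«' ['Q','E','»'] ['{','q','i','d','s','_','e','v','i','d','e','n','c','e','}']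
      (pvRep '«' ['Q','S','»'] ['{','q','i','d','s','_','s','c','o','r','e','s','}']
        (pvRep '}' [] ['}','}']
          (pvRep '{' [] ['{','{']
            (pvRep '{' ['q','i','d','s','_','e','v','i','d','e','n','c','e','}'] ['«','Q','E','»']
              (pvRep '{' ['q','i','d','s','_','s','c','o','r','e','s','}'] ['«','Q','S','»'] s)))))) = pvScan m s := by
  intro N
  induction N with
  | zero =>
    intro s hN _
    have : s = [] := List.length_eq_zero_iff.mp (Nat.le_zero.mp hN)
    subst this
    simp [pvRep, pvFmt, pvScan]
  | succ N ih =>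
    intro s hN hdom
    cases s with
    | nil => simp [pvRep, pvFmt, pvScan]
    | cons c₀ t₀ =>
      by_cases h1 : (['{','q','i','d','s','_','s','c','o','r','e','s','}'] : List Char).isPrefixOf (c₀ :: t₀) = true
      · obtain ⟨r, hr⟩ := List.isPrefixOf_iff_prefix.mp h1
        rw [← hr] at hN hdom ⊢
        have hrlen : r.length ≤ N := by simp at hN; omega
        have hrdom : ∀ c ∈ r, pvDomChar c = true := fun c hc => hdom c (List.mem_append_right _ hc)
        rw [pvRep_pref, pvRep_skip (a := '{') ['«','Q','S','»'] _ (by simp),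
            pvRep_skip (a := '{') ['«','Q','S','»'] _ (by simp),
            pvRep_skip (a := '}') ['«','Q','S','»'] _ (by simp),
            pvRep_pref, pvRep_skip (a := '«') ['{','q','i','d','s','_','s','c','o','r','e','s','}'] _ (by simp),
            pvFmt_scores, pvScan_scores m (List.isPrefixOf_iff_prefix.mpr ⟨r, rfl⟩),
            List.drop_left' (by decide)]
        exact congrArg _ (ih r hrlen hrdom)
      · by_cases h2 : (['{','q','i','d','s','_','e','v','i','d','e','n','c','e','}'] : List Char).isPrefixOf (c₀ :: t₀) = true
        · obtain ⟨r, hr⟩ := List.isPrefixOf_iff_prefix.mp h2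
          rw [← hr] at hN hdom h1 ⊢
          have hrlen : r.length ≤ N := by simp at hN; omega
          have hrdom : ∀ c ∈ r, pvDomChar c = true := fun c hc => hdom c (List.mem_append_right _ hc)
          rw [pvRep_neg_app _ (Bool.eq_false_iff.mpr h1),
              pvRep_skip (a := '{') ['q','i','d','s','_','e','v','i','d','e','n','c','e','}'] _ (by simp),
              pvRep_pref',
              pvRep_skip (a := '{') ['«','Q','E','»'] _ (by simp),
              pvRep_skip (a := '}') ['«','Q','E','»'] _ (by simp),
              pvRep_neg_app _ (pvNoPre_T1_T2 _),
              pvRep_skip (a := '«') ['Q','E','»'] _ (by simp),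
              pvRep_pref',
              pvFmt_evidence,
              pvScan_evidence m (Bool.eq_false_iff.mpr h1) (List.isPrefixOf_iff_prefix.mpr ⟨r, rfl⟩),
              List.drop_left' (by decide)]
          exact congrArg _ (ih r hrlen hrdom)
        · have htlen : t₀.length ≤ N := by simp at hN; omega
          have htdom : ∀ c ∈ t₀, pvDomChar c = true := fun c hc => hdom c (List.mem_cons_of_mem _ hc)
          by_cases hc1 : c₀ = '{'
          · subst hc1
            have hP2' : (['{','q','i','d','s','_','e','v','i','d','e','n','c','e','}'] : List Char).isPrefixOf
                ('{' :: pvRep '{' ['q','i','d','s','_','s','c','o','r','e','s','}'] ['«','Q','S','»'] t₀) = false := by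
              rw [Bool.eq_false_iff]
              intro hcon
              have hpfx := List.isPrefixOf_iff_prefix.mp hcon
              rw [List.cons_prefix_cons] at hpfx
              have h2' : (['q','i','d','s','_','e','v','i','d','e','n','c','e','}'] : List Char) <+: t₀ :=
                pvRep_reflect t₀.length t₀ _ le_rfl hpfx.2 (by simp)
              exact h2 (List.isPrefixOf_iff_prefix.mpr (List.cons_prefix_cons.mpr ⟨rfl, h2'⟩))
            rw [pvRep_neg _ (Bool.eq_false_iff.mpr h1),
                pvRep_neg _ hP2',
                pvRep_single_pos,
                pvRep_skip (a := '}') ['{','{'] _ (by simp),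
                pvRep_neg_app _ (isPrefixOf_cons_ne _ _ (by decide)),
                pvRep_neg_app _ (isPrefixOf_cons_ne _ _ (by decide)),
                List.nil_append,
                pvRep_step _ (show ('«' : Char) ≠ '{' by decide),
                pvRep_step _ (show ('«' : Char) ≠ '{' by decide),
                pvFmt_lbrace,
                pvScan_step m (Bool.eq_false_iff.mpr h1) (Bool.eq_false_iff.mpr h2)]
            exact congrArg _ (ih t₀ htlen htdom)
          · by_cases hc2 : c₀ = '}'
            · subst hc2
              rw [pvRep_step _ (show ('{' : Char) ≠ '}' by decide),
                  pvRep_step _ (show ('{' : Char) ≠ '}' by decide),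
                  pvRep_step _ (show ('{' : Char) ≠ '}' by decide),
                  pvRep_single_pos,
                  pvRep_neg_app _ (isPrefixOf_cons_ne _ _ (by decide)),
                  pvRep_neg_app _ (isPrefixOf_cons_ne _ _ (by decide)),
                  List.nil_append,
                  pvRep_step _ (show ('«' : Char) ≠ '}' by decide),
                  pvRep_step _ (show ('«' : Char) ≠ '}' by decide),
                  pvFmt_rbrace,
                  pvScan_step m (Bool.eq_false_iff.mpr h1) (Bool.eq_false_iff.mpr h2)]
              exact congrArg _ (ih t₀ htlen htdom)
            · have hcg : c₀ ≠ '«' := by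
                intro e
                have h := hdom c₀ (by simp)
                rw [e] at h
                exact absurd h (by decide)
              rw [pvRep_step _ (Ne.symm hc1),
                  pvRep_step _ (Ne.symm hc1),
                  pvRep_step _ (Ne.symm hc1),
                  pvRep_step _ (Ne.symm hc2),
                  pvRep_step _ (Ne.symm hcg),
                  pvRep_step _ (Ne.symm hcg),
                  pvFmt_other m _ hc1 hc2,
                  pvScan_step m (Bool.eq_false_iff.mpr h1) (Bool.eq_false_iff.mpr h2)]
              exact congrArg _ (ih t₀ htlen htdom)

-- ===== VERDICT (by name: the statement is the Claim_ definition above) =====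
theorem safe_schema_format_spec : Claim_equal_safe_schema_format := by
  intro template mapping hdom _hpre
  unfold Spec_safe_schema_format safe_schema_format safe_schema_format_alt
  show String.ofList (pvFmt mapping (PySem.Str.replace (PySem.Str.replace (PySem.Str.replace
      (PySem.Str.replace (PySem.Str.replace (PySem.Str.replace template "{qids_scores}" "«QS»")
      "{qids_evidence}" "«QE»") "{" "{{") "}" "}}") "«QS»" "{qids_scores}") "«QE»"
      "{qids_evidence}").toList) = String.ofList (pvScan mapping template.toList)
  refine congrArg String.ofList ?_
  simp only [PySem.Str.toList_replace]
  rw [show ("{qids_scores}" : String).toList = ['{','q','i','d','s','_','s','c','o','r','e','s','}'] from rfl,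
      show ("{qids_evidence}" : String).toList = ['{','q','i','d','s','_','e','v','i','d','e','n','c','e','}'] from rfl,
      show ("{" : String).toList = ['{'] from rfl,
      show ("}" : String).toList = ['}'] from rfl,
      show ("«QS»" : String).toList = ['«','Q','S','»'] from rfl,
      show ("«QE»" : String).toList = ['«','Q','E','»'] from rfl,
      show ("{{" : String).toList = ['{','{'] from rfl,
      show ("}}" : String).toList = ['}','}'] from rfl]
  rw [replace_eq_pvRep, replace_eq_pvRep, replace_eq_pvRep, replace_eq_pvRep,
      replace_eq_pvRep, replace_eq_pvRep]
  have hstr : ∀ c ∈ template.toList, pvDomChar c = true := by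
    unfold Dom_safe_schema_format pvDomStr at hdom
    simp [List.all_eq_true] at hdom
    exact fun c hc => hdom.1 c hc
  exact pvCore mapping template.toList.length template.toList le_rfl hstr
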